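-- pv_equiv track=rewrite | github.com/stefanoandroni/advent-of-code | 2022/day-23/part-2/main.py | get_normalized_points
-- ===== SOURCE A (Python) =====
-- def get_normalized_points(M):
--     min_x, min_y = max_x, max_y = M[0]
--     for x,y in M:
--         min_x = min(min_x, x)
--         min_y = min(min_y, y)
--
--     offset_x = abs(min_x) if min_x < 0 else -min_x
--     offset_y = abs(min_y) if min_y < 0 else -min_y
--
--     M = [(x + offset_x, y + offset_y) for x, y in M]
--
--     for x,y in M:
--         max_x = max(max_x, x)
--         max_y = max(max_y, y)
--
--     return M, max_x, max_y
-- ===== SOURCE B (Python) =====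
-- def get_normalized_points(M):
--     # single fused pass for the bounding box, then closed-form maxima
--     min_x, min_y = M[0]
--     max_x, max_y = min_x, min_y
--     for x, y in M[1:]:
--         if x < min_x: min_x = x
--         if x > max_x: max_x = x
--         if y < min_y: min_y = y
--         if y > max_y: max_y = y
--     return ([(x - min_x, y - min_y) for x, y in M], max_x - min_x, max_y - min_y)
-- ===== Notes on version B (the rewrite author's own statement) =====
-- stated objective: simpler
-- what changed: B fuses A's three passes (min scan, shifted-list rebuild, max re-scan) into one bounding-box scan plus a map, returning the maxima in closed form as max-min instead of re-scanning the shifted list.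
-- intended difference: On lists whose first point's x (resp. y) coordinate exceeds the corresponding maximum of the shifted points -- possible only when that coordinate's minimum is positive -- A returns a maximum seeded from the unshifted first point, while B returns the true maximum of the normalized list, which is what the function is for. — e.g. on get_normalized_points([(1, 0)]): A returns ([(0, 0)], 1, 0), B returns ([(0, 0)], 0, 0)
import Mathlib
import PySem

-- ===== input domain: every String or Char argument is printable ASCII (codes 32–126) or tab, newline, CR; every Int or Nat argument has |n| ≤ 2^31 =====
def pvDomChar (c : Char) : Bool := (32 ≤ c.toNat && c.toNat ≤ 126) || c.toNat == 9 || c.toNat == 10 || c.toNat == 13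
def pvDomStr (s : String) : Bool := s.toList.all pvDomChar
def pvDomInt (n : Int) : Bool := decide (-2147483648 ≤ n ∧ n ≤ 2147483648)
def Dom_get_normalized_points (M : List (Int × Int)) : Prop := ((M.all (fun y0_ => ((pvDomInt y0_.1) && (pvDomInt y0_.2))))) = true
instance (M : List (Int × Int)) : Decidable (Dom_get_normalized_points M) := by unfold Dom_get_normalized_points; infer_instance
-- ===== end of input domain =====

-- B fuses A's three passes into one bounding-box scan plus a map and returns the maxima
-- in closed form; on the D_ corner (first point above the shifted maxima) B returns the
-- intended maxima of the normalized list, where A's value is seeded from the unshifted head.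

-- ===== PORT A =====
def get_normalized_points (M : List (Int × Int)) : (List (Int × Int)) × Int × Int :=
  match M with
  | [] => ([], 0, 0)   -- unreachable under Pre_: Python raises IndexError on M[0]
  | p :: _ =>
    -- min_x, min_y = max_x, max_y = M[0]; loop over M taking pairwise mins
    let mn := M.foldl (fun (a : Int × Int) (xy : Int × Int) => (min a.1 xy.1, min a.2 xy.2)) p
    let offset_x : Int := if mn.1 < 0 then |mn.1| else -mn.1
    let offset_y : Int := if mn.2 < 0 then |mn.2| else -mn.2
    let M2 := M.map (fun xy => (xy.1 + offset_x, xy.2 + offset_y))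
    -- loop over shifted list taking pairwise maxes, seeded from the ORIGINAL M[0]
    let mx := M2.foldl (fun (a : Int × Int) (xy : Int × Int) => (max a.1 xy.1, max a.2 xy.2)) p
    (M2, mx.1, mx.2)

-- ===== PORT B =====
def get_normalized_points_alt (M : List (Int × Int)) : (List (Int × Int)) × Int × Int :=
  match M with
  | [] => ([], 0, 0)   -- unreachable under Pre_: Python raises IndexError on M[0]
  | p :: rest =>
    -- single fused pass: state is (min_x, max_x, min_y, max_y)
    let s := rest.foldl
      (fun (s : Int × Int × Int × Int) (xy : Int × Int) =>
        ((if xy.1 < s.1 then xy.1 else s.1),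
         (if xy.1 > s.2.1 then xy.1 else s.2.1),
         (if xy.2 < s.2.2.1 then xy.2 else s.2.2.1),
         (if xy.2 > s.2.2.2 then xy.2 else s.2.2.2)))
      (p.1, p.1, p.2, p.2)
    (M.map (fun xy => (xy.1 - s.1, xy.2 - s.2.2.1)), s.2.1 - s.1, s.2.2.2 - s.2.2.1)

-- ===== PRECONDITION & SPEC =====
-- Pre_ excludes only the empty list, on which Python A raises IndexError at M[0].
def Pre_get_normalized_points (M : List (Int × Int)) : Prop := M ≠ []
instance (M : List (Int × Int)) : Decidable (Pre_get_normalized_points M) := by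
  unfold Pre_get_normalized_points; infer_instance
def pvWitness_get_normalized_points : (List (Int × Int)) := [(0, 0), (2, -1)]

-- On lists whose first point's x (resp. y) exceeds the shifted maximum x (resp. y) — possible
-- only when the minimum coordinate is positive — A returns a maximum seeded from the unshifted
-- first point, while B returns the true maximum of the normalized points, which is intended.
def D_get_normalized_points (M : List (Int × Int)) : Prop :=
  M ≠ [] ∧
    ((M.map Prod.fst).foldl max M.headI.1 < M.headI.1 + (M.map Prod.fst).foldl min M.headI.1
     ∨ (M.map Prod.snd).foldl max M.headI.2 < M.headI.2 + (M.map Prod.snd).foldl min M.headI.2)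
instance (M : List (Int × Int)) : Decidable (D_get_normalized_points M) := by
  unfold D_get_normalized_points; infer_instance

def Spec_get_normalized_points (M : List (Int × Int)) (out : (List (Int × Int)) × Int × Int) : Prop :=
  ¬ D_get_normalized_points M → out = get_normalized_points_alt M
instance (M : List (Int × Int)) (out : (List (Int × Int)) × Int × Int) :
    Decidable (Spec_get_normalized_points M out) := by
  unfold Spec_get_normalized_points; infer_instance

def pvDiffWitness_get_normalized_points : (List (Int × Int)) := [(1, 0)]
def pvDiffWitnessOut_get_normalized_points :
    ((List (Int × Int)) × Int × Int) × ((List (Int × Int)) × Int × Int) :=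
  (([(0, 0)], 1, 0), ([(0, 0)], 0, 0))

-- ===== CLAIM (what is proved, stated in full; the proofs are below) =====
def Claim_unchanged_get_normalized_points : Prop :=
  ∀ (M : List (Int × Int)), Dom_get_normalized_points M → Pre_get_normalized_points M →
    Spec_get_normalized_points M (get_normalized_points M)
def Claim_changed_get_normalized_points : Prop :=
  Dom_get_normalized_points (pvDiffWitness_get_normalized_points) ∧
  Pre_get_normalized_points (pvDiffWitness_get_normalized_points) ∧
  D_get_normalized_points (pvDiffWitness_get_normalized_points) ∧
  get_normalized_points (pvDiffWitness_get_normalized_points) = pvDiffWitnessOut_get_normalized_points.1 ∧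
  get_normalized_points_alt (pvDiffWitness_get_normalized_points) = pvDiffWitnessOut_get_normalized_points.2 ∧
  pvDiffWitnessOut_get_normalized_points.1 ≠ pvDiffWitnessOut_get_normalized_points.2
def Claim_exact_get_normalized_points : Prop :=
  ∀ (M : List (Int × Int)), Dom_get_normalized_points M → Pre_get_normalized_points M →
    D_get_normalized_points M → get_normalized_points M ≠ get_normalized_points_alt M

-- ===== LEMMAS AND PROOFS =====

-- init is a lower bound of a max-fold
theorem pv_le_foldl_max : ∀ (xs : List Int) (b : Int), b ≤ xs.foldl max b := by
  intro xs
  induction xs with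
  | nil => intro b; simp
  | cons x t ih => intro b; exact le_trans (le_max_left b x) (ih (max b x))

-- a max-fold factors its init through max
theorem pv_foldl_max_max : ∀ (xs : List Int) (u v : Int),
    xs.foldl max (max u v) = max u (xs.foldl max v) := by
  intro xs
  induction xs with
  | nil => intro u v; simp
  | cons x t ih => intro u v; simp only [List.foldl, max_assoc]; exact ih u (max v x)

-- max-fold over a list shifted by -c
theorem pv_foldl_max_shift : ∀ (xs : List Int) (b c : Int),
    xs.foldl (fun a x => max a (x - c)) b = max b (xs.foldl max (b + c) - c) := by
  intro xs
  induction xs with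
  | nil => intro b c; simp
  | cons x t ih =>
    intro b c
    simp only [List.foldl]
    rw [ih]
    have h1 : max b (x - c) + c = max (b + c) x := by
      rcases le_total b (x - c) with h | h <;>
        simp [h] <;> omega
    rw [h1]
    have h2 : x ≤ t.foldl max (max (b + c) x) :=
      le_trans (le_max_right (b + c) x) (pv_le_foldl_max t _)
    rw [max_assoc]
    congr 1
    exact max_eq_right (by omega)

-- A's pairwise-min fold, componentwise
theorem pv_pairMin_fold : ∀ (L : List (Int × Int)) (a b : Int),
    L.foldl (fun (s : Int × Int) (xy : Int × Int) => (min s.1 xy.1, min s.2 xy.2)) (a, b)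
      = ((L.map Prod.fst).foldl min a, (L.map Prod.snd).foldl min b) := by
  intro L
  induction L with
  | nil => intro a b; simp
  | cons x t ih => intro a b; simp only [List.foldl, List.map]; exact ih _ _

-- A's pairwise-max fold, componentwise
theorem pv_pairMax_fold : ∀ (L : List (Int × Int)) (a b : Int),
    L.foldl (fun (s : Int × Int) (xy : Int × Int) => (max s.1 xy.1, max s.2 xy.2)) (a, b)
      = ((L.map Prod.fst).foldl max a, (L.map Prod.snd).foldl max b) := by
  intro L
  induction L with
  | nil => intro a b; simp
  | cons x t ih => intro a b; simp only [List.foldl, List.map]; exact ih _ _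

-- B's fused 4-component fold, componentwise
theorem pv_quad_fold : ∀ (L : List (Int × Int)) (a b c d : Int),
    L.foldl
      (fun (s : Int × Int × Int × Int) (xy : Int × Int) =>
        ((if xy.1 < s.1 then xy.1 else s.1),
         (if xy.1 > s.2.1 then xy.1 else s.2.1),
         (if xy.2 < s.2.2.1 then xy.2 else s.2.2.1),
         (if xy.2 > s.2.2.2 then xy.2 else s.2.2.2))) (a, b, c, d)
      = ((L.map Prod.fst).foldl min a, (L.map Prod.fst).foldl max b,
         (L.map Prod.snd).foldl min c, (L.map Prod.snd).foldl max d) := by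
  intro L
  induction L with
  | nil => intro a b c d; simp
  | cons x t ih =>
    intro a b c d
    simp only [List.foldl, List.map]
    rw [ih]
    congr 1 <;> [skip; congr 1] <;> [skip; skip; congr 1]
    · congr 1; rcases lt_or_ge x.1 a with h | h <;> simp [min_def] <;> omega
    · congr 1; rcases lt_or_ge b x.1 with h | h <;> simp [max_def] <;> omega
    · congr 1; rcases lt_or_ge x.2 c with h | h <;> simp [min_def] <;> omega
    · congr 1; rcases lt_or_ge d x.2 with h | h <;> simp [max_def] <;> omega

-- A's offset expression is just negation
theorem pv_offset_eq (m : Int) : (if m < 0 then |m| else -m) = -m := by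
  split_ifs with h
  · exact abs_of_neg h
  · rfl

-- the core computation of A's second component, for M = p :: rest and minx over M
theorem pv_A_max_comp (xs : List Int) (a minx : Int) :
    (a :: xs).foldl (fun s x => max s (x + -minx)) a
      = max a (max (a + minx) (xs.foldl max a) - minx) := by
  have h : ∀ x : Int, x + -minx = x - minx := fun x => by ring
  simp only [h]
  rw [pv_foldl_max_shift]
  congr 2
  rw [List.foldl_cons, pv_foldl_max_max]

-- both ports unfolded and componentwise-normalised on p :: rest
theorem pv_ports_eq (p : Int × Int) (rest : List (Int × Int)) :
    (get_normalized_points (p :: rest)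
      = ((p :: rest).map (fun xy => (xy.1 - (rest.map Prod.fst).foldl min p.1,
                                     xy.2 - (rest.map Prod.snd).foldl min p.2)),
         max p.1 (max (p.1 + (rest.map Prod.fst).foldl min p.1) ((rest.map Prod.fst).foldl max p.1)
                    - (rest.map Prod.fst).foldl min p.1),
         max p.2 (max (p.2 + (rest.map Prod.snd).foldl min p.2) ((rest.map Prod.snd).foldl max p.2)
                    - (rest.map Prod.snd).foldl min p.2)))
    ∧ (get_normalized_points_alt (p :: rest)
      = ((p :: rest).map (fun xy => (xy.1 - (rest.map Prod.fst).foldl min p.1,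
                                     xy.2 - (rest.map Prod.snd).foldl min p.2)),
         (rest.map Prod.fst).foldl max p.1 - (rest.map Prod.fst).foldl min p.1,
         (rest.map Prod.snd).foldl max p.2 - (rest.map Prod.snd).foldl min p.2)) := by
  constructor
  · show (get_normalized_points (p :: rest)) = _
    rw [get_normalized_points]
    rw [pv_pairMin_fold (p :: rest) p.1 p.2]
    simp only [List.map, List.foldl, min_self, pv_offset_eq]
    set minx := (rest.map Prod.fst).foldl min p.1 with hminx
    set miny := (rest.map Prod.snd).foldl min p.2 with hminy
    rw [pv_pairMax_fold]
    have hAx := pv_A_max_comp (rest.map Prod.fst) p.1 minx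
    have hAy := pv_A_max_comp (rest.map Prod.snd) p.2 miny
    simp only [List.foldl_cons, List.foldl_map] at hAx hAy
    dsimp only
    simp only [List.foldl_map]
    rw [hAx, hAy]
    simp only [← sub_eq_add_neg]
  · show (get_normalized_points_alt (p :: rest)) = _
    rw [get_normalized_points_alt]
    rw [pv_quad_fold rest p.1 p.1 p.2 p.2]

-- D_ on p :: rest, rephrased with rest-folds
theorem pv_D_iff (p : Int × Int) (rest : List (Int × Int)) :
    D_get_normalized_points (p :: rest) ↔
      ((rest.map Prod.fst).foldl max p.1 < p.1 + (rest.map Prod.fst).foldl min p.1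
       ∨ (rest.map Prod.snd).foldl max p.2 < p.2 + (rest.map Prod.snd).foldl min p.2) := by
  unfold D_get_normalized_points
  simp [List.headI, List.map]

-- ===== VERDICT (by name: the statement is the Claim_ definition above) =====
theorem get_normalized_points_spec : Claim_unchanged_get_normalized_points := by
  intro M _ hpre
  unfold Spec_get_normalized_points
  intro hnd
  match M with
  | [] => exact absurd rfl hpre
  | p :: rest =>
    obtain ⟨hA, hB⟩ := pv_ports_eq p rest
    rw [hA, hB]
    rw [pv_D_iff] at hnd
    push_neg at hnd
    obtain ⟨hx, hy⟩ := hnd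
    rw [max_eq_right hx, max_eq_right hy,
      max_eq_right (show p.1 ≤ _ by omega), max_eq_right (show p.2 ≤ _ by omega)]

theorem get_normalized_points_changed : Claim_changed_get_normalized_points := by
  unfold Claim_changed_get_normalized_points; decide

theorem get_normalized_points_tight : Claim_exact_get_normalized_points := by
  intro M _ hpre hD heq
  match M with
  | [] => exact absurd rfl hpre
  | p :: rest =>
    obtain ⟨hA, hB⟩ := pv_ports_eq p rest
    rw [pv_D_iff] at hD
    rw [hA, hB] at heq
    have h2 := congrArg (fun t : (List (Int × Int)) × Int × Int => t.2.1) heq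
    have h3 := congrArg (fun t : (List (Int × Int)) × Int × Int => t.2.2) heq
    simp only at h2 h3
    rcases hD with hx | hy
    · rw [max_eq_left (le_of_lt hx)] at h2
      have hxx : p.1 + (rest.map Prod.fst).foldl min p.1 - (rest.map Prod.fst).foldl min p.1 = p.1 := by ring
      rw [hxx, max_self] at h2
      omega
    · rw [max_eq_left (le_of_lt hy)] at h3
      have hyy : p.2 + (rest.map Prod.snd).foldl min p.2 - (rest.map Prod.snd).foldl min p.2 = p.2 := by ring
      rw [hyy, max_self] at h3
      omega
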